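-- pv_equiv track=rewrite | github.com/Julien-Devos/LINFO1101-Intro-programmation | [INFO1] Informatique 1 - Introduction à la programmation/Session 04/Carre.py | carre
-- ===== SOURCE A (Python) =====
-- def carre(n):
--     matrix = []
--     for i in range(n):
--         l=[]
--         for j in range(n):
--             l.append(n * i + j)
--         matrix.append(l)
--     return matrix
-- ===== SOURCE B (Python) =====
-- def carre(n):
--     flat = range(n * n)
--     return [list(flat[i * n:(i + 1) * n]) for i in range(n)]
-- ===== Notes on version B (the rewrite author's own statement) =====
-- stated objective: alternative
-- what changed: B views the matrix as the flat sequence 0..n*n-1 (a single range object) and reshapes it into rows by slicing, eliminating A's inner per-cell loop and arithmetic.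
import Mathlib
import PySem

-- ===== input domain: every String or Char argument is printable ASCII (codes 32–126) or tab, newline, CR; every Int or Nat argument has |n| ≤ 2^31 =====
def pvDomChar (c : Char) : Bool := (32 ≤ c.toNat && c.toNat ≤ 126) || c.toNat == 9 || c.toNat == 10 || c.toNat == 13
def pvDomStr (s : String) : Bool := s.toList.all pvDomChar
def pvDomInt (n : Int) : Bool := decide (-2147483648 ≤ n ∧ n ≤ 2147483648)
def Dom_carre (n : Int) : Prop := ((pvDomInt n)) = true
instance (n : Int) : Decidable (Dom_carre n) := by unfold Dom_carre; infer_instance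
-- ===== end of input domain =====

-- B views the matrix as the flat sequence 0..n*n-1 (one range object) and builds each row by slicing it; same result, no inner per-cell loop (objective: alternative decomposition).

-- ===== PORT A =====
def carre (n : Int) : List (List Int) :=
  (PySem.List.pyRange 0 n 1).foldl
    (fun matrix i =>
      matrix ++ [(PySem.List.pyRange 0 n 1).foldl (fun l j => l ++ [n * i + j]) []])
    []

-- ===== PORT B =====
-- 'flat = range(n*n)' is a lazy range object; 'list(flat[a:b])' for the nonnegative bounds a = i*n,
-- b = (i+1)*n used here is exactly range(min(a, n*n), min(b, n*n)) — ported as pyRange of the clamped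
-- bounds (exact for the nonnegative slice bounds B uses; a range object is never materialized).
def carre_alt (n : Int) : List (List Int) :=
  let L := n * n
  (PySem.List.pyRange 0 n 1).map
    (fun i => PySem.List.pyRange (min (i * n) L) (min ((i + 1) * n) L) 1)

-- ===== PRECONDITION & SPEC =====
def Spec_carre (n : Int) (out : List (List Int)) : Prop := out = carre_alt n
instance (n : Int) (out : List (List Int)) : Decidable (Spec_carre n out) := by unfold Spec_carre; infer_instance

-- ===== CLAIM (what is proved, stated in full; the proofs are below) =====
def Claim_equal_carre : Prop := ∀ (n : Int), Dom_carre n → Spec_carre n (carre n)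

-- ===== LEMMAS AND PROOFS =====

theorem foldl_append_singleton {α β : Type} (f : α → β) :
    ∀ (xs : List α) (init : List β),
      xs.foldl (fun acc x => acc ++ [f x]) init = init ++ xs.map f := by
  intro xs
  induction xs with
  | nil => simp
  | cons x xs ih => intro init; simp [List.foldl, ih]

theorem carre_eq_map (n : Int) :
    carre n = (PySem.List.pyRange 0 n 1).map
      (fun i => (PySem.List.pyRange 0 n 1).map (fun j => n * i + j)) := by
  unfold carre
  have h : ∀ i : Int, (PySem.List.pyRange 0 n 1).foldl (fun l j => l ++ [n * i + j]) [] =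
      (PySem.List.pyRange 0 n 1).map (fun j => n * i + j) := fun i => by
    simpa using foldl_append_singleton (fun j => n * i + j) (PySem.List.pyRange 0 n 1) []
  simp only [h]
  simpa using foldl_append_singleton
    (fun i => (PySem.List.pyRange 0 n 1).map (fun j => n * i + j)) (PySem.List.pyRange 0 n 1) []

theorem row_eq (n i : Int) (h0 : 0 ≤ i) (h1 : i < n) :
    PySem.List.pyRange (min (i * n) (n * n)) (min ((i + 1) * n) (n * n)) 1 =
      (PySem.List.pyRange 0 n 1).map (fun j => n * i + j) := by
  have hn : 0 ≤ n := le_of_lt (lt_of_le_of_lt h0 h1)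
  have hm1 : min (i * n) (n * n) = i * n := min_eq_left (by nlinarith)
  have hm2 : min ((i + 1) * n) (n * n) = (i + 1) * n := min_eq_left (by nlinarith)
  rw [hm1, hm2, PySem.List.pyRange_one, PySem.List.pyRange_one]
  have h2 : (i + 1) * n - i * n = n - 0 := by ring
  rw [h2, List.map_map]
  apply List.map_congr_left
  intro k _
  simp only [Function.comp]
  ring

-- ===== VERDICT (by name: the statement is the Claim_ definition above) =====
theorem carre_spec : Claim_equal_carre := by
  intro n _
  unfold Spec_carre carre_alt
  rw [carre_eq_map]
  apply List.map_congr_left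
  intro i hi
  rw [PySem.List.mem_pyRange_one] at hi
  rw [row_eq n i hi.1 hi.2]
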